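-- pv_equiv track=rewrite | github.com/fumail/postomaat | src/postomaat/plugins/spfcheck.py | is_private_address
-- ===== SOURCE A (Python) =====
-- def is_private_address(addr):
--     if addr=='127.0.0.1' or addr=='::1' or addr.startswith('10.') or addr.startswith('192.168.') or addr.startswith('fe80:'):
--         return True
--     if not addr.startswith('172.'):
--         return False
--     for i in range(16,32):
--         if addr.startswith('172.%s'%i):
--             return True
--     return False
-- ===== SOURCE B (Python) =====
-- _PRIV = {'10.', '192.168.', 'fe80:'} | {'172.%d' % i for i in range(16, 32)}
--
-- def is_private_address(addr):
--     if addr in ('127.0.0.1', '::1'):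
--         return True
--     heads = {addr[:n] for n in range(1, 9)}
--     return not heads.isdisjoint(_PRIV)
-- ===== Notes on version B (the rewrite author's own statement) =====
-- stated objective: alternative
-- what changed: Inverts the direction of the check: instead of testing the address against each private pattern with startswith (OR-cascade plus a 16-iteration formatting loop), B enumerates the address's own prefixes of lengths 1..8 as a set and intersects it with a precomputed set of private prefixes (isdisjoint).
import Mathlib
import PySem

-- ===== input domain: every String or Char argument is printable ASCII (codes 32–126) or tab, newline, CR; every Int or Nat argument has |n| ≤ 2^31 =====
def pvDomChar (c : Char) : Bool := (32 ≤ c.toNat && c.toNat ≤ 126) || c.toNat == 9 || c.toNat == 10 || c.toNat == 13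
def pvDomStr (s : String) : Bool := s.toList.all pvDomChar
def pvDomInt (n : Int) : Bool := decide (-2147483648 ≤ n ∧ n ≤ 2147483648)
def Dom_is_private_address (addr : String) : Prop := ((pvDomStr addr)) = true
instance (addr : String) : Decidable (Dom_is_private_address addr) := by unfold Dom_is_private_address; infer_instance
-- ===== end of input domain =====

-- B inverts A's scan: instead of testing the address against each private pattern with
-- startswith, it enumerates the address's own prefixes (lengths 1..8) and intersects that
-- set with a precomputed set of private prefixes; same cost, a table/set-driven shape.

-- ===== PORT A =====
def is_private_address (addr : String) : Bool :=
  if addr == "127.0.0.1" || addr == "::1" || PySem.Str.startswith addr "10."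
      || PySem.Str.startswith addr "192.168." || PySem.Str.startswith addr "fe80:" then
    true
  else if !(PySem.Str.startswith addr "172.") then
    false
  else
    -- for i in range(16,32): if addr.startswith('172.%s'%i): return True / return False
    (PySem.List.pyRange 16 32 1).any (fun i => PySem.Str.startswith addr ("172." ++ PySem.Int.toStr i))

-- ===== PORT B =====
-- _PRIV = {'10.', '192.168.', 'fe80:'} | {'172.%d' % i for i in range(16, 32)}
def pvPriv : PySem.Set String :=
  PySem.Set.union (PySem.Set.ofList ["10.", "192.168.", "fe80:"])
    (PySem.Set.ofList ((PySem.List.pyRange 16 32 1).map (fun i => "172." ++ PySem.Int.toStr i)))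

def is_private_address_alt (addr : String) : Bool :=
  if addr == "127.0.0.1" || addr == "::1" then true
  else
    -- heads = {addr[:n] for n in range(1, 9)}; return not heads.isdisjoint(_PRIV)
    let heads : PySem.Set String :=
      PySem.Set.ofList ((PySem.List.pyRange 1 9 1).map (fun n => PySem.Str.slice addr none (some n)))
    !(PySem.Set.isdisjoint heads pvPriv)

-- ===== PRECONDITION & SPEC =====
def Spec_is_private_address (addr : String) (out : Bool) : Prop := out = is_private_address_alt addr
instance (addr : String) (out : Bool) : Decidable (Spec_is_private_address addr out) := by unfold Spec_is_private_address; infer_instance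

-- ===== CLAIM (what is proved, stated in full; the proofs are below) =====
def Claim_equal_is_private_address : Prop := ∀ (addr : String), Dom_is_private_address addr → Spec_is_private_address addr (is_private_address addr)

-- ===== LEMMAS AND PROOFS =====

-- a pattern p of length 1..8 is a prefix of s iff p is one of s's slices s[:n], n = 1..8
lemma head_slice_iff (s p : String) (h1 : 1 ≤ p.toList.length) (h8 : p.toList.length ≤ 8) :
    (∃ n ∈ PySem.List.pyRange 1 9 1, PySem.Str.slice s none (some n) = p) ↔ p.toList <+: s.toList := by
  constructor
  · rintro ⟨n, hn, hs⟩
    rw [PySem.List.mem_pyRange_one] at hn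
    have h := congrArg String.toList hs
    simp only [PySem.Str.toList_slice, PySem.Chars.slice_eq_listSlice] at h
    rw [PySem.List.slice_to _ (by omega : (0:Int) ≤ n)] at h
    rw [← h]
    exact List.take_prefix _ _
  · intro hp
    refine ⟨(p.toList.length : Int), ?_, ?_⟩
    · rw [PySem.List.mem_pyRange_one]
      constructor <;> [exact_mod_cast h1; exact_mod_cast Nat.lt_of_le_of_lt h8 (by norm_num)]
    · apply String.toList_injective
      simp only [PySem.Str.toList_slice, PySem.Chars.slice_eq_listSlice]
      rw [PySem.List.slice_to _ (by positivity : (0:Int) ≤ (p.toList.length : Int))]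
      simpa using (List.prefix_iff_eq_take.mp hp).symm

-- ===== VERDICT (by name: the statement is the Claim_ definition above) =====
theorem is_private_address_spec : Claim_equal_is_private_address := by
  intro addr _
  unfold Spec_is_private_address is_private_address is_private_address_alt pvPriv
  by_cases h1 : addr = "127.0.0.1"
  · subst h1; decide
  by_cases h2 : addr = "::1"
  · subst h2; decide
  simp only [show (addr == "127.0.0.1") = false by simp [h1],
    show (addr == "::1") = false by simp [h2], Bool.false_or, Bool.or_false]
  rw [Bool.eq_iff_iff]
  simp only [Bool.not_eq_true']
  simp [PySem.Chars.startswith_iff]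
  rw [show ∀ (s t : PySem.Set String), (s.isdisjoint t = false) ↔ ∃ x ∈ s, x ∈ t by
    intro s t; simp [Bool.eq_false_iff, PySem.Set.isdisjoint_iff]]
  simp only [PySem.Set.mem_ofList, PySem.Set.mem_union, List.mem_map]
  constructor
  · rintro (((h | h) | h) | ⟨_, i, ⟨hi1, hi2⟩, h⟩)
    · exact ⟨"10.", (head_slice_iff addr _ (by decide) (by decide)).mpr h, by simp⟩
    · exact ⟨"192.168.", (head_slice_iff addr _ (by decide) (by decide)).mpr h, by simp⟩
    · exact ⟨"fe80:", (head_slice_iff addr _ (by decide) (by decide)).mpr h, by simp⟩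
    · refine ⟨"172." ++ PySem.Int.toStr i,
        (head_slice_iff addr _ ?_ ?_).mpr (by simpa [PySem.Int.toList_toStr] using h),
        Or.inr ⟨i, by rw [PySem.List.mem_pyRange_one]; exact ⟨hi1, hi2⟩, rfl⟩⟩
      · interval_cases i <;> decide
      · interval_cases i <;> decide
  · rintro ⟨x, hx, hmem | ⟨i, hi, hxi⟩⟩
    · simp only [List.mem_cons, List.not_mem_nil, or_false] at hmem
      rcases hmem with h | h | h <;> subst h
      · exact Or.inl (Or.inl (Or.inl ((head_slice_iff addr _ (by decide) (by decide)).mp hx)))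
      · exact Or.inl (Or.inl (Or.inr ((head_slice_iff addr _ (by decide) (by decide)).mp hx)))
      · exact Or.inl (Or.inr ((head_slice_iff addr _ (by decide) (by decide)).mp hx))
    · rw [PySem.List.mem_pyRange_one] at hi
      subst hxi
      have hpre : ("172." ++ PySem.Int.toStr i).toList <+: addr.toList := by
        refine (head_slice_iff addr _ ?_ ?_).mp hx
        · rcases hi with ⟨hi1, hi2⟩; interval_cases i <;> decide
        · rcases hi with ⟨hi1, hi2⟩; interval_cases i <;> decide
      have hpre' : ('1' :: '7' :: '2' :: '.' :: PySem.Int.toChars i) <+: addr.toList := by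
        simpa [PySem.Int.toList_toStr] using hpre
      refine Or.inr ⟨(List.prefix_append ['1','7','2','.'] (PySem.Int.toChars i)).trans hpre',
        ⟨i, hi, hpre'⟩⟩
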